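-- pv_equiv track=rewrite | github.com/WutIsHummus/Rorchestra | app/services/ingest/pipeline.py | _detect_script_type
-- ===== SOURCE A (Python) =====
-- _SCRIPT_TYPE_SUFFIXES = {
--     ".server.luau": "Script",
--     ".server.lua": "Script",
--     ".client.luau": "LocalScript",
--     ".client.lua": "LocalScript",
--     ".luau": "ModuleScript",
--     ".lua": "ModuleScript",
-- }
--
-- def _detect_script_type(file_path: str, class_name: str | None = None) -> str:
--     """Infer Script / LocalScript / ModuleScript from filename or className."""
--     if class_name and class_name in ("Script", "LocalScript", "ModuleScript"):
--         return class_name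
--     lower = file_path.lower()
--     for suffix, stype in _SCRIPT_TYPE_SUFFIXES.items():
--         if lower.endswith(suffix):
--             return stype
--     return "ModuleScript"
-- ===== SOURCE B (Python) =====
-- def _detect_script_type(file_path: str, class_name: str | None = None) -> str:
--     """Infer Script / LocalScript / ModuleScript from filename or className."""
--     if class_name and class_name in ("Script", "LocalScript", "ModuleScript"):
--         return class_name
--     lower = file_path.lower()
--     if lower.endswith(".luau"):
--         stem = lower[:-5]
--     elif lower.endswith(".lua"):
--         stem = lower[:-4]
--     else:
--         return "ModuleScript"
--     if stem.endswith(".server"):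
--         return "Script"
--     if stem.endswith(".client"):
--         return "LocalScript"
--     return "ModuleScript"
-- ===== Notes on version B (the rewrite author's own statement) =====
-- stated objective: simpler
-- what changed: Replaces the linear scan over the 6-entry suffix table with a two-stage parse: strip the .lua/.luau extension once, then classify the stem by its .server/.client infix.
import Mathlib
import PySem

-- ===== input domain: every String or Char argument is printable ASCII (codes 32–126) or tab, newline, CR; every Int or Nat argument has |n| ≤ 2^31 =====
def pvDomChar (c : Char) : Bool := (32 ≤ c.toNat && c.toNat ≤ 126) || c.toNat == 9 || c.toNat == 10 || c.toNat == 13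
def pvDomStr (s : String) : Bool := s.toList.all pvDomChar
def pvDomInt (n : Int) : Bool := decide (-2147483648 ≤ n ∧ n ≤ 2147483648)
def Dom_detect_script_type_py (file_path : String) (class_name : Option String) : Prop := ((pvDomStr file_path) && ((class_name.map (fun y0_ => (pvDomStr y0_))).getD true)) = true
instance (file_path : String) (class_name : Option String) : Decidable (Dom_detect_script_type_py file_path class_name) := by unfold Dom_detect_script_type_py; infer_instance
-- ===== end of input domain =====

-- ===== PORT A =====
-- B replaces A's scan over the 6-entry suffix table by stripping the .lua/.luau
-- extension once and classifying the stem (simpler decomposition, same results).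
def pvSuffixTable : List (String × String) :=
  [(".server.luau", "Script"), (".server.lua", "Script"),
   (".client.luau", "LocalScript"), (".client.lua", "LocalScript"),
   (".luau", "ModuleScript"), (".lua", "ModuleScript")]

def pvFindSuffix (lower : String) : List (String × String) → String
  | [] => "ModuleScript"
  | (suffix, stype) :: rest =>
      if PySem.Str.endswith lower suffix then stype else pvFindSuffix lower rest

def pvDetectA (file_path : String) : String :=
  pvFindSuffix (PySem.Str.lower file_path) pvSuffixTable

def detect_script_type_py (file_path : String) (class_name : Option String) : String :=
  match class_name with
  | some cn =>
      if (cn != "") && (cn == "Script" || cn == "LocalScript" || cn == "ModuleScript")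
      then cn else pvDetectA file_path
  | none => pvDetectA file_path

-- ===== PORT B =====
def pvStemType (stem : String) : String :=
  if PySem.Str.endswith stem ".server" then "Script"
  else if PySem.Str.endswith stem ".client" then "LocalScript"
  else "ModuleScript"

def pvDetectB (file_path : String) : String :=
  let lower := PySem.Str.lower file_path
  if PySem.Str.endswith lower ".luau" then
    pvStemType (PySem.Str.slice lower none (some (-5)))
  else if PySem.Str.endswith lower ".lua" then
    pvStemType (PySem.Str.slice lower none (some (-4)))
  else "ModuleScript"

def detect_script_type_py_alt (file_path : String) (class_name : Option String) : String :=
  match class_name with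
  | some cn =>
      if (cn != "") && (cn == "Script" || cn == "LocalScript" || cn == "ModuleScript")
      then cn else pvDetectB file_path
  | none => pvDetectB file_path

-- ===== PRECONDITION & SPEC =====
def Spec_detect_script_type_py (file_path : String) (class_name : Option String) (out : String) : Prop := out = detect_script_type_py_alt file_path class_name
instance (file_path : String) (class_name : Option String) (out : String) : Decidable (Spec_detect_script_type_py file_path class_name out) := by unfold Spec_detect_script_type_py; infer_instance

-- ===== CLAIM (what is proved, stated in full; the proofs are below) =====
def Claim_equal_detect_script_type_py : Prop := ∀ (file_path : String) (class_name : Option String), Dom_detect_script_type_py file_path class_name → Spec_detect_script_type_py file_path class_name (detect_script_type_py file_path class_name)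

-- ===== LEMMAS AND PROOFS =====

-- two suffixes of the same list are comparable
theorem suffix_comparable {s t l : List Char} (h1 : s <:+ l) (h2 : t <:+ l) :
    s <:+ t ∨ t <:+ s := by
  have := List.prefix_or_prefix_of_prefix (List.reverse_prefix.mpr h1) (List.reverse_prefix.mpr h2)
  rcases this with h | h
  · left; exact List.reverse_prefix.mp h
  · right; exact List.reverse_prefix.mp h

theorem ew_true {l p : List Char} (h : p <:+ l) : PySem.Chars.endswith l p = true :=
  (PySem.Chars.endswith_iff _ _).mpr h

theorem ew_false {l p : List Char} (h : ¬ p <:+ l) : PySem.Chars.endswith l p = false := by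
  rw [Bool.eq_false_iff]
  intro hb
  exact h (((PySem.Chars.endswith_iff _ _).mp hb))

theorem ew_congr {l m p q : List Char} (h : p <:+ l ↔ q <:+ m) :
    PySem.Chars.endswith l p = PySem.Chars.endswith m q := by
  rw [Bool.eq_iff_iff, PySem.Chars.endswith_iff, PySem.Chars.endswith_iff]
  exact h

-- if b is a suffix of l, then (a ++ b) is a suffix of l iff a is a suffix of the stem
theorem suffix_append_iff {a b l : List Char} (h : b <:+ l) :
    ((a ++ b) <:+ l ↔ a <:+ l.take (l.length - b.length)) := by
  obtain ⟨m, rfl⟩ := h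
  have hm : (m ++ b).take ((m ++ b).length - b.length) = m := by simp
  rw [hm]
  constructor
  · rintro ⟨t, ht⟩
    refine ⟨t, ?_⟩
    rw [← List.append_assoc] at ht
    exact List.append_cancel_right ht
  · rintro ⟨t, rfl⟩
    exact ⟨t, by simp⟩

theorem detectAB (fp : String) : pvDetectA fp = pvDetectB fp := by
  unfold pvDetectA pvDetectB pvSuffixTable
  set lower := PySem.Str.lower fp with hlow
  set l := lower.toList with hl
  by_cases h5 : (".luau".toList) <:+ l
  · -- ends with ".luau"
    have hne4 : ¬ ((".lua".toList) <:+ l) := by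
      intro h4
      rcases suffix_comparable h4 h5 with h | h
      · exact absurd h (by decide)
      · exact absurd h (by decide)
    have e5 : PySem.Str.endswith lower ".luau" = true := by
      simp only [PySem.Str.endswith_eq, ← hl]; exact ew_true h5
    have e4 : PySem.Str.endswith lower ".lua" = false := by
      simp only [PySem.Str.endswith_eq, ← hl]; exact ew_false hne4
    have eslua : PySem.Str.endswith lower ".server.lua" = false := by
      simp only [PySem.Str.endswith_eq, ← hl]
      exact ew_false (fun h => hne4 (List.IsSuffix.trans (by decide) h))
    have eclua : PySem.Str.endswith lower ".client.lua" = false := by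
      simp only [PySem.Str.endswith_eq, ← hl]
      exact ew_false (fun h => hne4 (List.IsSuffix.trans (by decide) h))
    have hstem : (PySem.Str.slice lower none (some (-5))).toList = l.take (l.length - 5) := by
      rw [PySem.Str.toList_slice, PySem.Chars.slice_eq_listSlice, ← hl,
          PySem.List.slice_to_neg_ofNat l 5 (by omega)]
    have hsplit : ∀ (p : List Char), p <:+ l.take (l.length - 5) ↔ (p ++ ".luau".toList) <:+ l := by
      intro p
      have := suffix_append_iff (a := p) h5
      simpa using this.symm
    have esrv : PySem.Str.endswith lower ".server.luau"
        = PySem.Str.endswith (PySem.Str.slice lower none (some (-5))) ".server" := by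
      simp only [PySem.Str.endswith_eq, ← hl, hstem]
      refine ew_congr ?_
      rw [hsplit]
      have hcat : (".server.luau".toList : List Char) = ".server".toList ++ ".luau".toList := by decide
      rw [hcat]
    have ecli : PySem.Str.endswith lower ".client.luau"
        = PySem.Str.endswith (PySem.Str.slice lower none (some (-5))) ".client" := by
      simp only [PySem.Str.endswith_eq, ← hl, hstem]
      refine ew_congr ?_
      rw [hsplit]
      have hcat : (".client.luau".toList : List Char) = ".client".toList ++ ".luau".toList := by decide
      rw [hcat]
    simp only [pvFindSuffix, pvStemType, e5, e4, eslua, eclua, esrv, ecli]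
    simp
  · by_cases h4 : (".lua".toList) <:+ l
    · -- ends with ".lua" but not ".luau"
      have e5 : PySem.Str.endswith lower ".luau" = false := by
        simp only [PySem.Str.endswith_eq, ← hl]; exact ew_false h5
      have e4 : PySem.Str.endswith lower ".lua" = true := by
        simp only [PySem.Str.endswith_eq, ← hl]; exact ew_true h4
      have esluau : PySem.Str.endswith lower ".server.luau" = false := by
        simp only [PySem.Str.endswith_eq, ← hl]
        exact ew_false (fun h => h5 (List.IsSuffix.trans (by decide) h))
      have ecluau : PySem.Str.endswith lower ".client.luau" = false := by
        simp only [PySem.Str.endswith_eq, ← hl]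
        exact ew_false (fun h => h5 (List.IsSuffix.trans (by decide) h))
      have hstem : (PySem.Str.slice lower none (some (-4))).toList = l.take (l.length - 4) := by
        rw [PySem.Str.toList_slice, PySem.Chars.slice_eq_listSlice, ← hl,
            PySem.List.slice_to_neg_ofNat l 4 (by omega)]
      have hsplit : ∀ (p : List Char), p <:+ l.take (l.length - 4) ↔ (p ++ ".lua".toList) <:+ l := by
        intro p
        have := suffix_append_iff (a := p) h4
        simpa using this.symm
      have esrv : PySem.Str.endswith lower ".server.lua"
          = PySem.Str.endswith (PySem.Str.slice lower none (some (-4))) ".server" := by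
        simp only [PySem.Str.endswith_eq, ← hl, hstem]
        refine ew_congr ?_
        rw [hsplit]
        have hcat : (".server.lua".toList : List Char) = ".server".toList ++ ".lua".toList := by decide
        rw [hcat]
      have ecli : PySem.Str.endswith lower ".client.lua"
          = PySem.Str.endswith (PySem.Str.slice lower none (some (-4))) ".client" := by
        simp only [PySem.Str.endswith_eq, ← hl, hstem]
        refine ew_congr ?_
        rw [hsplit]
        have hcat : (".client.lua".toList : List Char) = ".client".toList ++ ".lua".toList := by decide
        rw [hcat]
      simp only [pvFindSuffix, pvStemType, e5, e4, esluau, ecluau, esrv, ecli]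
      simp
    · -- no lua extension: every table suffix fails
      have nofix : ∀ (suf : String), (".luau".toList <:+ suf.toList ∨ ".lua".toList <:+ suf.toList) →
          PySem.Str.endswith lower suf = false := by
        intro suf hsuf
        simp only [PySem.Str.endswith_eq, ← hl]
        refine ew_false (fun h => ?_)
        rcases hsuf with h' | h'
        · exact h5 (List.IsSuffix.trans h' h)
        · exact h4 (List.IsSuffix.trans h' h)
      have e1 := nofix ".server.luau" (Or.inl (by decide))
      have e2 := nofix ".server.lua" (Or.inr (by decide))
      have e3 := nofix ".client.luau" (Or.inl (by decide))
      have e4' := nofix ".client.lua" (Or.inr (by decide))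
      have e5 := nofix ".luau" (Or.inl (by decide))
      have e6 := nofix ".lua" (Or.inr (by decide))
      simp only [pvFindSuffix, e1, e2, e3, e4', e5, e6]
      simp

-- ===== VERDICT (by name: the statement is the Claim_ definition above) =====
theorem detect_script_type_py_spec : Claim_equal_detect_script_type_py := by
  intro file_path class_name _
  unfold Spec_detect_script_type_py detect_script_type_py detect_script_type_py_alt
  cases class_name with
  | none => exact detectAB file_path
  | some cn =>
      by_cases h : ((cn != "") && (cn == "Script" || cn == "LocalScript" || cn == "ModuleScript")) = true
      · simp [h]
      · simp only [Bool.not_eq_true] at h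
        simp [h, detectAB file_path]
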